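-- pv_equiv track=rewrite | github.com/AlexanderDLe/Python_DataStructuresAndAlgorithms | Amazon/_OAPrefixSum.py | func
-- ===== SOURCE A (Python) =====
-- def func(n, m):
--   DP = [[0]*n for _ in range(m + 1)]
--
--   for row in DP: row[0] = 1
--   for i in range(n): DP[0][i] = i + 1
--
--   for row in range(1, m + 1):
--     for col in range(1, n):
--       DP[row][col] = DP[row - 1][col] + DP[row][col - 1]
--
--   return DP[-1]
-- ===== SOURCE B (Python) =====
-- def func(n, m):
--     # closed form: result[c] = C(c+m+1, m+1), computed incrementally
--     row = []
--     v = 1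
--     for c in range(n):
--         if c > 0:
--             v = v * (m + c + 1) // c
--         row.append(v)
--     return row
-- ===== Notes on version B (the rewrite author's own statement) =====
-- stated objective: faster
-- what changed: Replaces the (m+1) x n prefix-sum DP table with the closed form row[c] = C(c+m+1, m+1), computed incrementally in one pass with an exact multiplicative recurrence.
import Mathlib
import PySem

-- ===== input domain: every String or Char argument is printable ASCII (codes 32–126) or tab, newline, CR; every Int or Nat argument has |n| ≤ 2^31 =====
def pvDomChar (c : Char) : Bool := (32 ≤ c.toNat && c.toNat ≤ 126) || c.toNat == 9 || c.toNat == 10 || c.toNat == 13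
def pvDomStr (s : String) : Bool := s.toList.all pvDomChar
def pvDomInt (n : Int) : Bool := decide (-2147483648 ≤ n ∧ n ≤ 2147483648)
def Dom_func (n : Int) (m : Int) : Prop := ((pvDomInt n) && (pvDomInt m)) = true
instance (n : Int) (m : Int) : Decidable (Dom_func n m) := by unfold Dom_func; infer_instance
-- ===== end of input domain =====

-- B replaces A's (m+1)-row prefix-sum DP table with the closed form C(c+m+1, m+1)
-- computed incrementally in one pass (objective: faster).

-- ===== PORT A =====
-- helpers for Python's 2-D indexing DP[i][j] := v and reads DP[i][j]
def pvGet2 (DP : List (List Int)) (i j : Nat) : Int := (DP.getD i []).getD j 0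
def pvSet2 (DP : List (List Int)) (i j : Nat) (v : Int) : List (List Int) :=
  DP.set i ((DP.getD i []).set j v)

def func (n : Int) (m : Int) : List Int :=
  let DP0 : List (List Int) :=
    (PySem.List.pyRange 0 (m + 1) 1).map (fun _ => List.replicate n.toNat 0)
  let DP1 := DP0.map (fun row => row.set 0 1)
  let DP2 := (PySem.List.pyRange 0 n 1).foldl (fun DP i => pvSet2 DP 0 i.toNat (i + 1)) DP1
  let DP3 := (PySem.List.pyRange 1 (m + 1) 1).foldl
      (fun DP row => (PySem.List.pyRange 1 n 1).foldl
        (fun DP col =>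
          pvSet2 DP row.toNat col.toNat
            (pvGet2 DP (row.toNat - 1) col.toNat + pvGet2 DP row.toNat (col.toNat - 1))) DP) DP2
  (PySem.List.pyGet? DP3 (-1)).getD []


-- ===== PORT B =====
def func_alt (n : Int) (m : Int) : List Int :=
  ((PySem.List.pyRange 0 n 1).foldl
    (fun (st : Int × List Int) c =>
      let v := if c > 0 then PySem.Int.floordiv (st.1 * (m + c + 1)) c else st.1
      (v, st.2 ++ [v])) (1, [])).2


-- ===== PRECONDITION & SPEC =====
-- Python A raises IndexError unless n >= 1 and m >= 0 (empty rows / zero rows).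
def Pre_func (n : Int) (m : Int) : Prop := 1 ≤ n ∧ 0 ≤ m
instance (n : Int) (m : Int) : Decidable (Pre_func n m) := by unfold Pre_func; infer_instance
def pvWitness_func : Int × Int := (3, 2)

def Spec_func (n : Int) (m : Int) (out : List Int) : Prop := out = func_alt n m
instance (n : Int) (m : Int) (out : List Int) : Decidable (Spec_func n m out) := by unfold Spec_func; infer_instance

-- ===== CLAIM (what is proved, stated in full; the proofs are below) =====
def Claim_equal_func : Prop := ∀ (n : Int) (m : Int), Dom_func n m → Pre_func n m → Spec_func n m (func n m)

-- ===== LEMMAS AND PROOFS =====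
def pvRowL (N i : Nat) : List Int := (List.range N).map fun c => (Nat.choose (c + i + 1) (i + 1) : Int)
def pvInit (N : Nat) : List Int := (List.replicate N 0).set 0 1
def pvPartial (N r c : Nat) : List Int :=
  (List.range N).map fun j => if j ≤ c then (Nat.choose (j + r + 1) (r + 1) : Int) else 0

-- generic list helpers
theorem pvGetD_append_left {α} (A B : List α) (d : α) (i : Nat) (h : i < A.length) :
    (A ++ B).getD i d = A.getD i d := by
  simp [List.getD, List.getElem?_append_left h]

theorem pvGetD_append_length {α} (A : List α) (x : α) (B : List α) (d : α) :
    (A ++ x :: B).getD A.length d = x := by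
  simp [List.getD, List.getElem?_append_right (Nat.le_refl _)]

theorem pvSet_append_length {α} (A : List α) (x : α) (B : List α) (v : α) :
    (A ++ x :: B).set A.length v = A ++ v :: B := by
  induction A with
  | nil => simp
  | cons a A ih => simp [List.set, ih]

theorem pvGetD_append_at {α} (A : List α) (x : α) (B : List α) (d : α) (i : Nat) (h : A.length = i) :
    (A ++ x :: B).getD i d = x := h ▸ pvGetD_append_length A x B d

theorem pvSet_append_at {α} (A : List α) (x : α) (B : List α) (v : α) (i : Nat) (h : A.length = i) :
    (A ++ x :: B).set i v = A ++ v :: B := h ▸ pvSet_append_length A x B v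

theorem pvInit_eq_partial (N r : Nat) (hN : 1 ≤ N) : pvInit N = pvPartial N r 0 := by
  apply List.ext_getElem
  · simp [pvInit, pvPartial]
  · intro j h1 h2
    simp [pvInit, pvPartial] at h1 ⊢
    rcases Nat.eq_zero_or_pos j with rfl | hj
    · simp
    · rw [List.getElem_set_ne (by omega)]
      simp [Nat.pos_iff_ne_zero.mp hj]

theorem pvPartial_last (N r : Nat) (hN : 1 ≤ N) : pvPartial N r (N - 1) = pvRowL N r := by
  apply List.ext_getElem <;> simp [pvPartial, pvRowL]
  intro j h; omega

theorem pvPartial_set (N r c : Nat) (h : c + 1 < N) :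
    (pvPartial N r c).set (c + 1) ((Nat.choose (c + 1 + r + 1) (r + 1) : Int)) = pvPartial N r (c + 1) := by
  apply List.ext_getElem
  · simp [pvPartial]
  · intro j h1 h2
    have hj : j < N := by simpa [pvPartial] using h2
    simp only [pvPartial] at h1 ⊢
    by_cases hje : j = c + 1
    · subst hje
      rw [List.getElem_set_self (by simpa using hj)]
      simp
    · rw [List.getElem_set_ne (fun hh => hje hh.symm)]
      simp only [List.getElem_map, List.getElem_range]
      have : (j ≤ c) ↔ (j ≤ c + 1) := by omega
      simp only [this]

theorem pvRowL_getD (N i j : Nat) (h : j < N) :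
    (pvRowL N i).getD j 0 = (Nat.choose (j + i + 1) (i + 1) : Int) := by
  simp [pvRowL, List.getD, List.getElem?_map, List.getElem?_range h]

theorem pvPartial_getD (N r c j : Nat) (h : j < N) :
    (pvPartial N r c).getD j 0 = if j ≤ c then (Nat.choose (j + r + 1) (r + 1) : Int) else 0 := by
  simp [pvPartial, List.getD, List.getElem?_map, List.getElem?_range h]

theorem pvA_getD (N R i : Nat) (h : i < R) :
    ((List.range R).map (pvRowL N)).getD i [] = pvRowL N i := by
  simp [List.getD, List.getElem?_map, List.getElem?_range h]

theorem pvInner (N R : Nat) (hR : 1 ≤ R) (hN : 1 ≤ N) (rest : List (List Int)) :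
    ∀ c : Nat, c ≤ N - 1 →
    (PySem.List.pyRange 1 ((c:Int) + 1) 1).foldl
      (fun DP col => pvSet2 DP R col.toNat (pvGet2 DP (R - 1) col.toNat + pvGet2 DP R (col.toNat - 1)))
      ((List.range R).map (pvRowL N) ++ pvPartial N R 0 :: rest)
    = (List.range R).map (pvRowL N) ++ pvPartial N R c :: rest := by
  intro c
  induction c with
  | zero =>
      intro _
      have : PySem.List.pyRange 1 ((0:Int) + 1) 1 = [] := PySem.List.pyRange_one_eq_nil (by norm_num)
      simp [this]
  | succ c ih =>
      intro hc
      have hcast : ((c:Int) + 1 + 1) = (((c+1:Nat)):Int) + 1 := by push_cast; ring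
      have hsplit : PySem.List.pyRange 1 (((c+1:Nat):Int) + 1) 1
          = PySem.List.pyRange 1 ((c:Int) + 1) 1 ++ [((c:Int) + 1)] := by
        rw [← hcast]
        exact PySem.List.pyRange_one_succ_right (by omega)
      rw [hsplit, List.foldl_append, ih (by omega)]
      simp only [List.foldl_cons, List.foldl_nil]
      have hA : ((List.range R).map (pvRowL N)).length = R := by simp
      have htn : ((c:Int) + 1).toNat = c + 1 := by omega
      simp only [htn, Nat.add_sub_cancel]
      -- reads
      have hprev : pvGet2 ((List.range R).map (pvRowL N) ++ pvPartial N R c :: rest) (R - 1) (c + 1)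
          = (Nat.choose (c + 1 + (R - 1) + 1) ((R - 1) + 1) : Int) := by
        unfold pvGet2
        rw [pvGetD_append_left _ _ _ _ (by simp; omega), pvA_getD _ _ _ (by omega),
          pvRowL_getD _ _ _ (by omega)]
      have hcur : pvGet2 ((List.range R).map (pvRowL N) ++ pvPartial N R c :: rest) R c
          = (Nat.choose (c + R + 1) (R + 1) : Int) := by
        unfold pvGet2
        rw [pvGetD_append_at _ _ _ _ _ hA, pvPartial_getD _ _ _ _ (by omega)]
        simp
      rw [hprev, hcur]
      -- the write
      unfold pvSet2
      rw [pvGetD_append_at _ _ _ _ _ hA, pvSet_append_at _ _ _ _ _ hA]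
      congr 1
      have hRR : R - 1 + 1 = R := by omega
      have hsum : (Nat.choose (c + 1 + (R - 1) + 1) ((R - 1) + 1) : Int) + (Nat.choose (c + R + 1) (R + 1) : Int)
          = (Nat.choose (c + 1 + R + 1) (R + 1) : Int) := by
        have h1 : c + 1 + (R - 1) + 1 = c + R + 1 := by omega
        rw [h1, hRR]
        have h2 : c + 1 + R + 1 = (c + R + 1) + 1 := by omega
        rw [h2, Nat.choose_succ_succ (c + R + 1) R]
        push_cast
        ring
      rw [hsum]
      congr 1
      exact pvPartial_set N R c (by omega)

def pvRow0 (N k : Nat) : List Int := (List.range N).map fun c => if c < k then ((c:Int) + 1) else 0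

theorem pvFold0 (l : List Int) (r : List Int) (rest : List (List Int)) :
    l.foldl (fun DP i => pvSet2 DP 0 i.toNat (i + 1)) (r :: rest)
    = (l.foldl (fun r i => r.set i.toNat (i + 1)) r) :: rest := by
  induction l generalizing r with
  | nil => rfl
  | cons a l ih =>
      rw [List.foldl_cons, List.foldl_cons,
        show pvSet2 (r :: rest) 0 a.toNat (a + 1) = (r.set a.toNat (a + 1)) :: rest from by
          simp [pvSet2, List.getD]]
      exact ih _

theorem pvRow0_loop (N : Nat) (hN : 1 ≤ N) : ∀ k, 1 ≤ k → k ≤ N →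
    (PySem.List.pyRange 0 (k : Int) 1).foldl (fun r i => r.set i.toNat (i + 1)) (pvInit N)
    = pvRow0 N k := by
  intro k hk1
  induction k, hk1 using Nat.le_induction with
  | base =>
      intro _
      have h01 : PySem.List.pyRange 0 1 1 = [0] := by decide
      rw [show ((1:Nat):Int) = 1 from by norm_num, h01]
      simp only [List.foldl_cons, List.foldl_nil, Int.toNat_zero]
      apply List.ext_getElem
      · simp [pvInit, pvRow0]
      · intro j h1 h2
        have hj : j < N := by simpa [pvRow0] using h2
        simp only [pvInit, pvRow0, List.getElem_map, List.getElem_range]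
        rcases Nat.eq_zero_or_pos j with rfl | hj0
        · rw [List.getElem_set_self (by simpa using hj)]; simp
        · rw [List.getElem_set_ne (by omega), List.getElem_set_ne (by omega)]
          simp [hj, Nat.pos_iff_ne_zero.mp hj0]
  | succ k hk ih =>
      intro hkN
      have hcast : ((k:Int) + 1) = (((k+1:Nat)):Int) := by push_cast; ring
      have hsplit : PySem.List.pyRange 0 (((k+1:Nat)):Int) 1
          = PySem.List.pyRange 0 (k:Int) 1 ++ [(k:Int)] := by
        rw [← hcast]
        exact PySem.List.pyRange_one_succ_right (by omega)
      rw [hsplit, List.foldl_append, ih (by omega)]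
      simp only [List.foldl_cons, List.foldl_nil, Int.toNat_natCast]
      apply List.ext_getElem
      · simp [pvRow0]
      · intro j h1 h2
        have hj : j < N := by simpa [pvRow0] using h2
        simp only [pvRow0, List.getElem_map, List.getElem_range]
        by_cases hje : j = k
        · subst hje
          rw [List.getElem_set_self (by simpa [pvRow0] using hj)]
          simp
        · rw [List.getElem_set_ne (fun hh => hje hh.symm)]
          simp only [pvRow0, List.getElem_map, List.getElem_range]
          have : (j < k) ↔ (j < k + 1) := by omega
          simp only [this]

theorem pvRow0_full (N : Nat) : pvRow0 N N = pvRowL N 0 := by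
  apply List.ext_getElem
  · simp [pvRow0, pvRowL]
  · intro j h1 h2
    have hj : j < N := by simpa [pvRow0] using h1
    simp [pvRow0, pvRowL, hj, Nat.choose_one_right]

theorem pvOuter (N M : Nat) (hN : 1 ≤ N) : ∀ r, r ≤ M →
    (PySem.List.pyRange 1 ((r:Int) + 1) 1).foldl
      (fun DP row => (PySem.List.pyRange 1 ((N:Nat):Int) 1).foldl
        (fun DP col => pvSet2 DP row.toNat col.toNat
          (pvGet2 DP (row.toNat - 1) col.toNat + pvGet2 DP row.toNat (col.toNat - 1))) DP)
      (pvRowL N 0 :: List.replicate M (pvInit N))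
    = (List.range (r + 1)).map (pvRowL N) ++ List.replicate (M - r) (pvInit N) := by
  intro r
  induction r with
  | zero =>
      intro _
      have : PySem.List.pyRange 1 ((0:Int) + 1) 1 = [] := PySem.List.pyRange_one_eq_nil (by norm_num)
      simp [this]
  | succ r ih =>
      intro hr
      have hcast : ((r+1:Nat):Int) + 1 = ((r:Int) + 1) + 1 := by push_cast; ring
      have hsplit : PySem.List.pyRange 1 (((r+1:Nat):Int) + 1) 1
          = PySem.List.pyRange 1 ((r:Int) + 1) 1 ++ [(r:Int) + 1] := by
        rw [hcast]
        exact PySem.List.pyRange_one_succ_right (by omega)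
      rw [hsplit, List.foldl_append, ih (by omega)]
      simp only [List.foldl_cons, List.foldl_nil]
      have htn : ((r:Int) + 1).toNat = r + 1 := by omega
      simp only [htn]
      have hrep : List.replicate (M - r) (pvInit N) = pvInit N :: List.replicate (M - (r+1)) (pvInit N) := by
        have : M - r = (M - (r+1)) + 1 := by omega
        rw [this, List.replicate_succ]
      rw [hrep, pvInit_eq_partial N (r+1) hN]
      have hNcast : ((N:Nat):Int) = ((N - 1 : Nat):Int) + 1 := by omega
      rw [hNcast, pvInner N (r+1) (by omega) hN _ (N-1) (by omega), pvPartial_last N (r+1) hN]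
      simp [List.range_succ]

theorem bloop (m : Int) (M : Nat) (hm : m = (M:Int)) (k : Nat) (hk : 1 ≤ k) :
    (PySem.List.pyRange 0 (k : Int) 1).foldl
      (fun (st : Int × List Int) c =>
        let v := if c > 0 then PySem.Int.floordiv (st.1 * (m + c + 1)) c else st.1
        (v, st.2 ++ [v])) (1, [])
    = ((Nat.choose (k + M) (M + 1) : Int), pvRowL k M) := by
  induction k, hk using Nat.le_induction with
  | base =>
      have h01 : PySem.List.pyRange 0 1 1 = [0] := by decide
      have : 1 + M = M + 1 := by ring
      simp [h01, pvRowL, this]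
  | succ k hk ih =>
      have hsplit : (PySem.List.pyRange 0 ((k:Int)+1) 1) = PySem.List.pyRange 0 (k:Int) 1 ++ [(k:Int)] :=
        PySem.List.pyRange_one_succ_right (by positivity)
      have hcast : ((k:Int)+1) = (((k+1:Nat)):Int) := by push_cast; ring
      rw [← hcast, hsplit, List.foldl_append, ih]
      have hpos : (0:Int) < (k:Int) := by exact_mod_cast hk
      simp only [List.foldl_cons, List.foldl_nil]
      have harith : ((Nat.choose (k + M) (M + 1) : Int)) * (m + (k:Int) + 1)
          = ((Nat.choose (k + 1 + M) (M + 1) * k : Nat) : Int) := by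
        subst hm
        push_cast
        have h := Nat.choose_mul_succ_eq (k + M) (M + 1)
        have h2 : k + M + 1 - (M + 1) = k := by omega
        rw [h2] at h
        have : ((Nat.choose (k+M) (M+1) * (k+M+1) : Nat) : Int) = ((Nat.choose (k+M+1) (M+1) * k : Nat) : Int) := by
          exact_mod_cast congrArg (Nat.cast (R := Int)) h
        push_cast at this
        have h3 : k + 1 + M = k + M + 1 := by ring
        rw [h3]
        linarith [this]
      simp only [hpos, if_pos, gt_iff_lt]
      rw [harith]
      have hdiv : PySem.Int.floordiv ((Nat.choose (k + 1 + M) (M + 1) * k : Nat) : Int) ((k:Nat) : Int)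
          = ((Nat.choose (k + 1 + M) (M + 1) : Nat) : Int) := by
        rw [PySem.Int.floordiv_natCast]
        congr 1
        exact Nat.mul_div_cancel _ (by omega)
      rw [hdiv]
      have h3 : k + 1 + M = k + M + 1 := by ring
      simp [pvRowL, List.range_succ, h3]


theorem pvMap_const {A B : Type} (l : List A) (b : B) :
    l.map (fun _ => b) = List.replicate l.length b := by
  induction l with
  | nil => rfl
  | cons a l ih => simp [ih, List.replicate_succ]


theorem funcA_eq (n m : Int) (hn : 1 ≤ n) (hm : 0 ≤ m) :
    func n m = pvRowL n.toNat m.toNat := by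
  obtain ⟨N, rfl⟩ : ∃ N : Nat, n = (N : Int) := ⟨n.toNat, (Int.toNat_of_nonneg (by omega)).symm⟩
  obtain ⟨M, rfl⟩ : ∃ M : Nat, m = (M : Int) := ⟨m.toNat, (Int.toNat_of_nonneg hm).symm⟩
  have hN : 1 ≤ N := by exact_mod_cast hn
  simp only [func, Int.toNat_natCast]
  have h0 : (PySem.List.pyRange 0 ((M:Int) + 1) 1).map (fun _ => List.replicate N (0:Int))
      = List.replicate (M + 1) (List.replicate N (0:Int)) := by
    rw [pvMap_const, PySem.List.length_pyRange_one]
    norm_num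
  rw [h0, List.map_replicate]
  have h1 : List.replicate (M + 1) ((List.replicate N (0:Int)).set 0 1)
      = pvInit N :: List.replicate M (pvInit N) := by
    simp [pvInit, List.replicate_succ]
  rw [h1, pvFold0, pvRow0_loop N hN N hN (le_refl N), pvRow0_full N, pvOuter N M hN M (le_refl M)]
  simp only [Nat.sub_self, List.replicate_zero, List.append_nil]
  rw [show M + 1 = M + 1 from rfl, List.range_succ, List.map_append, List.map_singleton,
    PySem.List.pyGet?_neg_one_append_singleton]
  rfl


theorem funcAlt_eq (n m : Int) (hn : 1 ≤ n) (hm : 0 ≤ m) :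
    func_alt n m = pvRowL n.toNat m.toNat := by
  obtain ⟨N, rfl⟩ : ∃ N : Nat, n = (N : Int) := ⟨n.toNat, (Int.toNat_of_nonneg (by omega)).symm⟩
  have hN : 1 ≤ N := by exact_mod_cast hn
  unfold func_alt
  rw [bloop m m.toNat (Int.toNat_of_nonneg hm).symm N hN]
  simp

-- ===== VERDICT (by name: the statement is the Claim_ definition above) =====
theorem func_spec : Claim_equal_func := by
  intro n m _ hpre
  unfold Spec_func
  rw [funcA_eq n m hpre.1 hpre.2, funcAlt_eq n m hpre.1 hpre.2]
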